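-- pv_equiv track=rewrite | github.com/gyuelgyuel/Programmers_sol | 프로그래머스/unrated/181921. 배열 만들기 2/배열 만들기 2.py | solution
-- ===== SOURCE A (Python) =====
-- def solution(l, r):
--     answer = []
--     for i in range((l//5)*5,(r//5+1)*5):
--         string = str(i)
--         is5n0 = True
--         for s in string:
--             if s!="0" and s!="5":
--                 is5n0 = False
--         if is5n0:
--             answer.append(i)
--     if len(answer)==0:
--         return [-1]
--     return answer
-- ===== SOURCE B (Python) =====
-- def solution(l, r):
--     # Enumerate numbers whose decimal digits are all 0 or 5 directly, level by
--     # level (one level per digit count), instead of scanning the whole range.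
--     nums = [0]
--     level = [5]
--     head = 5
--     while head <= r:
--         nums += level
--         head *= 10
--         level = [10 * x + d for x in level for d in (0, 5)]
--     ans = [x for x in nums if l <= x <= r]
--     return ans if ans else [-1]
-- ===== Notes on version B (the rewrite author's own statement) =====
-- stated objective: alternative
-- what changed: Instead of scanning every integer from (l//5)*5 to (r//5+1)*5 and string-testing its digits, B generates the numbers whose decimal digits are all 0 or 5 directly, level by level (one level per digit count), and filters them to [l, r].
-- intended difference: When l is not a multiple of 5, (l//5)*5 is itself a 0/5-digit number and the scanned range is nonempty (l//5 <= r//5), A wrongly includes (l//5)*5, which is below l, in its answer; B returns only the 0/5-digit numbers inside [l, r], which is what the task asks for. — e.g. on solution(6, 50): A returns [5, 50], B returns [50]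
import Mathlib
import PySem

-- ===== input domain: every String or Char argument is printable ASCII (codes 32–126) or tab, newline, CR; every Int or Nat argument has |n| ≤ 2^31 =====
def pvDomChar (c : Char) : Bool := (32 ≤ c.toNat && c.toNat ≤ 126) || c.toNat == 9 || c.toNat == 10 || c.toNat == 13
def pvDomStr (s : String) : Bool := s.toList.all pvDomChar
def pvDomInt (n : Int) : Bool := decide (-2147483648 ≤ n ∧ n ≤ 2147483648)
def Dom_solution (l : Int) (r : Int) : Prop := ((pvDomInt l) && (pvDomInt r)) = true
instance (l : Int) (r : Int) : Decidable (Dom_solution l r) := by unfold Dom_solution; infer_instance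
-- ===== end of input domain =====

-- B replaces A's linear scan of [(l//5)*5, (r//5+1)*5) (string-testing each number's digits)
-- by direct level-by-level generation of the numbers whose decimal digits are all 0 or 5,
-- filtered to [l, r]; A wrongly also returns (l//5)*5 when it lies below l (see D_solution).

-- ===== PORT A =====
def solution (l : Int) (r : Int) : List Int :=
  let answer : List Int :=
    (PySem.List.pyRange (PySem.Int.floordiv l 5 * 5) ((PySem.Int.floordiv r 5 + 1) * 5) 1).foldl
      (fun answer i =>
        let string := PySem.Int.toChars i
        let is5n0 := string.foldl (fun is5n0 s => if s ≠ '0' ∧ s ≠ '5' then false else is5n0) true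
        if is5n0 then answer ++ [i] else answer) []
  if PySem.List.len answer = 0 then [-1] else answer

-- ===== PORT B =====
-- the while-loop of Source B; the Nat fuel only makes the recursion structural (the loop always
-- exits by head > r before the fuel runs out, see solution_alt)
def bfsLoop : Nat → Int → Int → List Int → List Int → List Int
  | 0, _, _, _, nums => nums
  | fuel + 1, r, head, level, nums =>
    if head ≤ r then
      bfsLoop fuel r (head * 10) (level.flatMap fun x => [10 * x, 10 * x + 5]) (nums ++ level)
    else nums

def solution_alt (l : Int) (r : Int) : List Int :=
  let nums := bfsLoop (r.toNat + 1) r 5 [5] [0]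
  let ans := nums.filter (fun x => decide (l ≤ x ∧ x ≤ r))
  if ans = [] then [-1] else ans

-- ===== PRECONDITION & SPEC =====
-- When l is not a multiple of 5, (l//5)*5 is a 0/5-digit number and A's scanned range is
-- nonempty, A wrongly includes (l//5)*5 < l in its answer; B returns only the 0/5-digit
-- numbers inside [l, r], which is what the task asks for.
def D_solution (l : Int) (r : Int) : Prop :=
  PySem.Int.mod l 5 ≠ 0 ∧ 0 ≤ l ∧ PySem.Int.floordiv l 5 ≤ PySem.Int.floordiv r 5 ∧
    ∀ k : Nat, k < 11 → l / 5 * 5 / 10 ^ k % 10 = 0 ∨ l / 5 * 5 / 10 ^ k % 10 = 5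
instance (l : Int) (r : Int) : Decidable (D_solution l r) := by unfold D_solution; infer_instance

def Spec_solution (l : Int) (r : Int) (out : List Int) : Prop :=
  ¬ D_solution l r → out = solution_alt l r
instance (l : Int) (r : Int) (out : List Int) : Decidable (Spec_solution l r out) := by
  unfold Spec_solution; infer_instance

def pvDiffWitness_solution : Int × Int := (6, 50)
def pvDiffWitnessOut_solution : (List Int) × (List Int) := ([5, 50], [50])

-- ===== CLAIM (what is proved, stated in full; the proofs are below) =====
def Claim_unchanged_solution : Prop :=
  ∀ (l : Int) (r : Int), Dom_solution l r → Spec_solution l r (solution l r)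
def Claim_changed_solution : Prop :=
  Dom_solution (pvDiffWitness_solution.1) (pvDiffWitness_solution.2) ∧
  D_solution (pvDiffWitness_solution.1) (pvDiffWitness_solution.2) ∧
  solution (pvDiffWitness_solution.1) (pvDiffWitness_solution.2) = pvDiffWitnessOut_solution.1 ∧
  solution_alt (pvDiffWitness_solution.1) (pvDiffWitness_solution.2) = pvDiffWitnessOut_solution.2 ∧
  pvDiffWitnessOut_solution.1 ≠ pvDiffWitnessOut_solution.2
def Claim_exact_solution : Prop :=
  ∀ (l : Int) (r : Int), Dom_solution l r → D_solution l r → solution l r ≠ solution_alt l r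

-- ===== LEMMAS AND PROOFS =====

-- closed-form digit test used by the proofs: all decimal digits 0 or 5
def digits05 : Nat → Nat → Bool
  | _, 0 => true
  | 0, _ + 1 => true          -- fuel exhausted; unreachable whenever fuel ≥ n
  | f + 1, n + 1 => (((n + 1) % 10 == 0) || ((n + 1) % 10 == 5)) && digits05 f ((n + 1) / 10)

def dig05 (n : Nat) : Bool := digits05 n n

def good05 (x : Int) : Bool := decide (0 ≤ x) && dig05 x.toNat

-- fuel irrelevance and the one-step unfolding of dig05
lemma digits05_congr (n : Nat) : ∀ (f g : Nat), n ≤ f → n ≤ g → digits05 f n = digits05 g n := by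
  induction n using Nat.strong_induction_on with
  | _ n ih =>
    intro f g hf hg
    match n, f, g with
    | 0, f, g => cases f <;> cases g <;> rfl
    | n + 1, f + 1, g + 1 =>
      simp only [digits05]
      congr 1
      exact ih ((n + 1) / 10) (by omega) f g (by omega) (by omega)

lemma dig05_eq (n : Nat) :
    dig05 n = if n = 0 then true
      else ((n % 10 == 0) || (n % 10 == 5)) && dig05 (n / 10) := by
  match n with
  | 0 => rfl
  | n + 1 =>
    simp only [dig05, digits05, if_neg (Nat.succ_ne_zero n)]
    congr 1
    exact digits05_congr ((n + 1) / 10) n ((n + 1) / 10) (by omega) (by omega)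

lemma dig05_small (n : Nat) (h : n < 10) : dig05 n = (n == 0 || n == 5) := by
  rw [dig05_eq]
  rcases Nat.eq_zero_or_pos n with h0 | h0
  · subst h0; rfl
  · rw [if_neg (by omega)]
    have h1 : n % 10 = n := Nat.mod_eq_of_lt h
    have h2 : n / 10 = 0 := Nat.div_eq_of_lt h
    rw [h1, h2]
    simp [dig05, digits05]

lemma dig05_ge10 (n : Nat) (h : 10 ≤ n) :
    dig05 n = (((n % 10 == 0) || (n % 10 == 5)) && dig05 (n / 10)) := by
  rw [dig05_eq, if_neg (by omega)]

lemma dig05_mod5 (n : Nat) (h : dig05 n = true) : n % 5 = 0 := by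
  rw [dig05_eq] at h
  rcases Nat.eq_zero_or_pos n with h0 | h0
  · simp [h0]
  · rw [if_neg (by omega)] at h
    simp only [Bool.and_eq_true, Bool.or_eq_true, beq_iff_eq] at h
    omega

lemma dig05_shape (n : Nat) (h : dig05 n = true) (hn : n ≠ 0) :
    ∃ j : Nat, 5 * 10 ^ j ≤ n ∧ n < 10 ^ (j + 1) := by
  induction n using Nat.strong_induction_on with
  | _ n ih =>
    by_cases h10 : n < 10
    · have := dig05_small n h10
      rw [this] at h
      simp only [Bool.or_eq_true, beq_iff_eq] at h
      rcases h with h2 | h2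
      · exact absurd h2 hn
      · exact ⟨0, by omega, by omega⟩
    · rw [dig05_ge10 n (by omega)] at h
      simp only [Bool.and_eq_true, Bool.or_eq_true, beq_iff_eq] at h
      obtain ⟨-, h2⟩ := h
      obtain ⟨j, hj1, hj2⟩ :=
        ih (n / 10) (by omega) h2 (by omega)
      refine ⟨j + 1, ?_, ?_⟩
      · calc 5 * 10 ^ (j + 1) = 10 * (5 * 10 ^ j) := by ring
        _ ≤ 10 * (n / 10) := by omega
        _ ≤ n := Nat.mul_div_le n 10
      · have := Nat.div_add_mod n 10
        have h3 : n / 10 < 10 ^ (j + 1) := hj2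
        calc n = 10 * (n / 10) + n % 10 := (Nat.div_add_mod n 10).symm
        _ < 10 * 10 ^ (j + 1) := by omega
        _ = 10 ^ (j + 1 + 1) := by ring

-- str(n)'s characters for n : Nat, as a convenient recursion
def dig (n : Nat) : List Char :=
  if n < 10 then [Nat.digitChar n] else dig (n / 10) ++ [Nat.digitChar (n % 10)]
decreasing_by exact Nat.div_lt_self (by omega) (by norm_num)

lemma toDigitsCore_eq_dig : ∀ (f n : Nat) (ds : List Char), n < f →
    Nat.toDigitsCore 10 f n ds = dig n ++ ds := by
  intro f
  induction f with
  | zero => intro n ds h; omega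
  | succ f ih =>
    intro n ds h
    rw [Nat.toDigitsCore]
    by_cases h10 : n < 10
    · rw [if_pos (Nat.div_eq_of_lt h10), dig, if_pos h10, Nat.mod_eq_of_lt h10]
      simp
    · rw [if_neg (by omega), ih (n / 10) _ (by omega)]
      conv_rhs => rw [dig]
      rw [if_neg h10]
      simp
lemma toDigits_eq_dig (n : Nat) : Nat.toDigits 10 n = dig n := by
  rw [Nat.toDigits, toDigitsCore_eq_dig (n + 1) n [] (by omega)]
  simp

lemma digitChar_ok (d : Nat) (h : d < 10) :
    ((Nat.digitChar d == '0') || (Nat.digitChar d == '5')) = (d == 0 || d == 5) := by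
  interval_cases d <;> decide

lemma all_dig (n : Nat) : ((dig n).all fun c => c == '0' || c == '5') = dig05 n := by
  induction n using Nat.strong_induction_on with
  | _ n ih =>
    by_cases h10 : n < 10
    · rw [dig, if_pos h10, dig05_small n h10]
      simp only [List.all_cons, List.all_nil, Bool.and_true]
      exact digitChar_ok n h10
    · rw [dig, if_neg h10, dig05_ge10 n (by omega), List.all_append,
        ih (n / 10) (Nat.div_lt_self (by omega) (by norm_num))]
      simp only [List.all_cons, List.all_nil, Bool.and_true]
      rw [digitChar_ok (n % 10) (by omega), Bool.and_comm]

-- A's inner loop is an `all` over the characters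
lemma foldl_is5n0 (cs : List Char) : ∀ b : Bool,
    cs.foldl (fun is5n0 s => if s ≠ '0' ∧ s ≠ '5' then false else is5n0) b
      = (b && cs.all fun c => c == '0' || c == '5') := by
  induction cs with
  | nil => intro b; simp
  | cons c cs ih =>
    intro b
    rw [List.foldl_cons, ih, List.all_cons]
    by_cases hc : c ≠ '0' ∧ c ≠ '5'
    · rw [if_pos hc]
      have : (c == '0' || c == '5') = false := by
        simp only [Bool.or_eq_false_iff, beq_eq_false_iff_ne]
        exact hc
      rw [this]
      simp
    · rw [if_neg hc]
      have : (c == '0' || c == '5') = true := by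
        simp only [Bool.or_eq_true, beq_iff_eq]
        by_cases h0 : c = '0'
        · exact Or.inl h0
        · exact Or.inr (by tauto)
      rw [this]
      simp

-- A's digit test equals good05
lemma chk_eq (i : Int) :
    (PySem.Int.toChars i).foldl (fun is5n0 s => if s ≠ '0' ∧ s ≠ '5' then false else is5n0) true
      = good05 i := by
  rw [foldl_is5n0, Bool.true_and, PySem.Int.toChars]
  by_cases hi : i < 0
  · rw [if_pos hi]
    have : (decide (0 ≤ i)) = false := by simp; omega
    simp [good05, this]
  · rw [if_neg hi, toDigits_eq_dig, all_dig, good05]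
    have : (decide (0 ≤ i)) = true := by simp; omega
    rw [this, Bool.true_and]

lemma good05_nonneg (x : Int) (h : good05 x = true) : 0 ≤ x := by
  simp only [good05, Bool.and_eq_true, decide_eq_true_eq] at h
  exact h.1

lemma good05_mod5 (x : Int) (h : good05 x = true) : x % 5 = 0 := by
  simp only [good05, Bool.and_eq_true, decide_eq_true_eq] at h
  have := dig05_mod5 x.toNat h.2
  omega

lemma good05_mul10 (y : Int) (h : good05 y = true) :
    good05 (10 * y) = true ∧ good05 (10 * y + 5) = true := by
  have hy : 0 ≤ y := good05_nonneg y h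
  simp only [good05, Bool.and_eq_true, decide_eq_true_eq] at h ⊢
  rcases eq_or_lt_of_le hy with h0 | h0
  · subst h0
    exact ⟨⟨by norm_num, by decide⟩, ⟨by norm_num, by decide⟩⟩
  · have e1 : (10 * y).toNat = 10 * y.toNat := by omega
    have e2 : (10 * y + 5).toNat = 10 * y.toNat + 5 := by omega
    refine ⟨⟨by omega, ?_⟩, ⟨by omega, ?_⟩⟩
    · rw [e1, dig05_ge10 _ (by omega)]
      simp [Nat.mul_mod_right, h.2, Nat.mul_div_cancel_left _ (by norm_num : (0:Nat) < 10)]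
    · rw [e2, dig05_ge10 _ (by omega)]
      have m1 : (10 * y.toNat + 5) % 10 = 5 := by omega
      have m2 : (10 * y.toNat + 5) / 10 = y.toNat := by omega
      simp [m1, m2, h.2]

lemma good05_split (x : Int) (hx : 10 ≤ x) (h : good05 x = true) :
    ∃ y : Int, good05 y = true ∧ (x = 10 * y ∨ x = 10 * y + 5) := by
  simp only [good05, Bool.and_eq_true, decide_eq_true_eq] at h
  rw [dig05_ge10 x.toNat (by omega)] at h
  have h2 := h.2
  simp only [Bool.and_eq_true, Bool.or_eq_true, beq_iff_eq] at h2
  refine ⟨(x.toNat / 10 : Nat), ?_, ?_⟩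
  · simp only [good05, Bool.and_eq_true, decide_eq_true_eq]
    refine ⟨Int.natCast_nonneg _, ?_⟩
    rw [Int.toNat_natCast]
    exact h2.2
  · have := Nat.div_add_mod x.toNat 10
    omega

lemma good05_int_shape (x : Int) (h : good05 x = true) (h0 : x ≠ 0) :
    ∃ j : Nat, 5 * 10 ^ j ≤ x ∧ x < 10 ^ (j + 1) := by
  simp only [good05, Bool.and_eq_true, decide_eq_true_eq] at h
  obtain ⟨j, hj1, hj2⟩ := dig05_shape x.toNat h.2 (by omega)
  refine ⟨j, ?_, ?_⟩
  · have : ((5 * 10 ^ j : Nat) : Int) ≤ (x.toNat : Int) := by exact_mod_cast hj1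
    push_cast at this
    omega
  · have : ((x.toNat : Nat) : Int) < ((10 ^ (j + 1) : Nat) : Int) := by exact_mod_cast hj2
    push_cast at this
    omega

lemma pairwise_flatMap (level : List Int) (h : level.Pairwise (· < ·)) :
    (level.flatMap fun x => [10 * x, 10 * x + 5]).Pairwise (· < ·) := by
  induction level with
  | nil => simp
  | cons a level ih =>
    rw [List.pairwise_cons] at h
    rw [List.flatMap_cons, List.pairwise_append]
    refine ⟨by simp, ih h.2, ?_⟩
    intro u hu v hv
    simp only [List.mem_cons, List.not_mem_nil, or_false] at hu
    obtain ⟨w, hw, hvw⟩ := List.mem_flatMap.mp hv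
    have haw : a < w := h.1 w hw
    simp only [List.mem_cons, List.not_mem_nil, or_false] at hvw
    rcases hu with hu | hu <;> rcases hvw with hvw | hvw <;> omega

-- the invariant of Source B's while-loop
lemma bfs_spec : ∀ (fuel : Nat) (r head : Int) (k : Nat) (level nums : List Int),
    head = 5 * 10 ^ k →
    r < head * 10 ^ fuel →
    level.Pairwise (· < ·) →
    (∀ x ∈ level, head ≤ x ∧ x < 2 * head) →
    (∀ x : Int, head ≤ x → x < 2 * head → (x ∈ level ↔ good05 x = true)) →
    nums.Pairwise (· < ·) →
    (∀ x ∈ nums, x < head) →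
    (∀ x : Int, x < head → (x ∈ nums ↔ good05 x = true)) →
    (bfsLoop fuel r head level nums).Pairwise (· < ·) ∧
      (∀ x : Int, x ≤ r → (x ∈ bfsLoop fuel r head level nums ↔ good05 x = true)) := by
  intro fuel
  induction fuel with
  | zero =>
    intro r head k level nums hh hf hl1 hl2 hl3 hn1 hn2 hn3
    simp only [bfsLoop]
    exact ⟨hn1, fun x hx => hn3 x (by simpa using lt_of_le_of_lt hx hf)⟩
  | succ fuel ih =>
    intro r head k level nums hh hf hl1 hl2 hl3 hn1 hn2 hn3
    have hpos : 0 < head := by rw [hh]; positivity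
    by_cases hhr : head ≤ r
    · rw [bfsLoop, if_pos hhr]
      apply ih r (head * 10) (k + 1)
      · rw [hh]; ring
      · have : head * 10 * 10 ^ fuel = head * 10 ^ (fuel + 1) := by ring
        rw [this]; exact hf
      · exact pairwise_flatMap level hl1
      · intro x hx
        obtain ⟨y, hy, hxy⟩ := List.mem_flatMap.mp hx
        obtain ⟨hy1, hy2⟩ := hl2 y hy
        simp only [List.mem_cons, List.not_mem_nil, or_false] at hxy
        rcases hxy with h | h <;> omega
      · intro x h1 h2
        constructor
        · intro hx
          obtain ⟨y, hy, hxy⟩ := List.mem_flatMap.mp hx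
          have hgy := (hl3 y (hl2 y hy).1 (hl2 y hy).2).mp hy
          obtain ⟨g1, g2⟩ := good05_mul10 y hgy
          simp only [List.mem_cons, List.not_mem_nil, or_false] at hxy
          rcases hxy with h | h <;> simp [h, g1, g2]
        · intro hx
          obtain ⟨y, hgy, hxy⟩ := good05_split x (by omega) hx
          have hy1 : head ≤ y := by omega
          have hy2 : y < 2 * head := by omega
          refine List.mem_flatMap.mpr ⟨y, (hl3 y hy1 hy2).mpr hgy, ?_⟩
          simp only [List.mem_cons, List.not_mem_nil, or_false]
          omega
      · exact List.pairwise_append.mpr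
          ⟨hn1, hl1, fun a ha b hb => lt_of_lt_of_le (hn2 a ha) (hl2 b hb).1⟩
      · intro x hx
        rcases List.mem_append.mp hx with h | h
        · have := hn2 x h; omega
        · have := (hl2 x h).2; omega
      · intro x hx
        rw [List.mem_append]
        constructor
        · rintro (h | h)
          · exact (hn3 x (hn2 x h)).mp h
          · exact (hl3 x (hl2 x h).1 (hl2 x h).2).mp h
        · intro hg
          by_cases hxh : x < head
          · exact Or.inl ((hn3 x hxh).mpr hg)
          · by_cases hx2 : x < 2 * head
            · exact Or.inr ((hl3 x (by omega) hx2).mpr hg)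
            · exfalso
              obtain ⟨j, hj1, hj2⟩ := good05_int_shape x hg (by omega)
              have e2 : 2 * head = 10 ^ (k + 1) := by rw [hh]; ring
              have e10 : head * 10 = 5 * 10 ^ (k + 1) := by rw [hh]; ring
              by_cases hjk : j ≤ k
              · have : (10 : Int) ^ (j + 1) ≤ 10 ^ (k + 1) :=
                  pow_le_pow_right₀ (by norm_num) (by omega)
                omega
              · have : (10 : Int) ^ (k + 1) ≤ 10 ^ j :=
                  pow_le_pow_right₀ (by norm_num) (by omega)
                omega
    · rw [bfsLoop, if_neg hhr]
      exact ⟨hn1, fun x hx => hn3 x (by omega)⟩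

-- Source B's nums list: sorted, and below r it holds exactly the 0/5-digit numbers
lemma nums_spec (r : Int) :
    (bfsLoop (r.toNat + 1) r 5 [5] [0]).Pairwise (· < ·) ∧
      (∀ x : Int, x ≤ r → (x ∈ bfsLoop (r.toNat + 1) r 5 [5] [0] ↔ good05 x = true)) := by
  apply bfs_spec (r.toNat + 1) r 5 0 [5] [0]
  · norm_num
  · rcases le_or_gt 0 r with h | h
    · have h1 : r.toNat < 10 ^ r.toNat := Nat.lt_pow_self (by norm_num)
      have h2 : ((10 : Nat) ^ r.toNat : Int) = (10 : Int) ^ r.toNat := by push_cast; ring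
      have h3 : (r.toNat : Int) < (10 : Int) ^ r.toNat := by exact_mod_cast h1
      have h4 : (10 : Int) ^ r.toNat ≤ 10 ^ (r.toNat + 1) :=
        pow_le_pow_right₀ (by norm_num) (by omega)
      have h5 : (0 : Int) < 10 ^ (r.toNat + 1) := by positivity
      omega
    · have h5 : (0 : Int) < 10 ^ (r.toNat + 1) := by positivity
      omega
  · simp
  · intro x hx
    simp only [List.mem_singleton] at hx
    omega
  · intro x h1 h2
    simp only [List.mem_singleton]
    constructor
    · intro hx; subst hx; decide
    · intro hg
      have := good05_mod5 x hg
      omega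
  · simp
  · intro x hx
    simp only [List.mem_singleton] at hx
    omega
  · intro x hx
    simp only [List.mem_singleton]
    constructor
    · intro h; subst h; decide
    · intro hg
      have h1 := good05_nonneg x hg
      have h2 := good05_mod5 x hg
      omega

-- A's loop is a filter by good05 over the scanned range
lemma A_fold (xs : List Int) :
    (xs.foldl (fun answer i =>
        let string := PySem.Int.toChars i
        let is5n0 := string.foldl (fun is5n0 s => if s ≠ '0' ∧ s ≠ '5' then false else is5n0) true
        if is5n0 then answer ++ [i] else answer) [])
      = xs.filter good05 := by
  have h := PySem.List.foldl_append_if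
    (fun i : Int => (PySem.Int.toChars i).foldl
      (fun is5n0 s => if s ≠ '0' ∧ s ≠ '5' then false else is5n0) true)
    (id) xs []
  simp only [List.map_id, List.nil_append] at h
  rw [show (fun answer (i : Int) =>
        let string := PySem.Int.toChars i
        let is5n0 := string.foldl (fun is5n0 s => if s ≠ '0' ∧ s ≠ '5' then false else is5n0) true
        if is5n0 then answer ++ [i] else answer)
      = (fun (acc : List Int) (x : Int) =>
          if (PySem.Int.toChars x).foldl
              (fun is5n0 s => if s ≠ '0' ∧ s ≠ '5' then false else is5n0) true = true
            then acc ++ [id x] else acc) from rfl, h]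
  exact List.filter_congr fun x _ => chk_eq x

-- outside D_solution, A's scanned window agrees with [l, r] on 0/5-digit numbers
lemma mem_core (l r x : Int)
    (hND : ¬ (PySem.Int.mod l 5 ≠ 0 ∧ good05 (PySem.Int.floordiv l 5 * 5) = true ∧
      PySem.Int.floordiv l 5 ≤ PySem.Int.floordiv r 5)) (hg : good05 x = true) :
    (PySem.Int.floordiv l 5 * 5 ≤ x ∧ x < (PySem.Int.floordiv r 5 + 1) * 5) ↔
      (l ≤ x ∧ x ≤ r) := by
  have hl := PySem.Int.floordiv_mul_add_mod l 5
  have hlm1 := PySem.Int.mod_nonneg l (by norm_num : (0:Int) < 5)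
  have hlm2 := PySem.Int.mod_lt l (by norm_num : (0:Int) < 5)
  have hr := PySem.Int.floordiv_mul_add_mod r 5
  have hrm1 := PySem.Int.mod_nonneg r (by norm_num : (0:Int) < 5)
  have hrm2 := PySem.Int.mod_lt r (by norm_num : (0:Int) < 5)
  have h5 := good05_mod5 x hg
  constructor
  · rintro ⟨h1, h2⟩
    have hxr : x ≤ r := by omega
    refine ⟨?_, hxr⟩
    by_contra hlt
    apply hND
    have hx : x = PySem.Int.floordiv l 5 * 5 := by omega
    exact ⟨by omega, hx ▸ hg, by omega⟩
  · rintro ⟨h1, h2⟩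
    omega

-- the two filtered lists coincide outside D_solution
lemma lists_eq (l r : Int)
    (hND : ¬ (PySem.Int.mod l 5 ≠ 0 ∧ good05 (PySem.Int.floordiv l 5 * 5) = true ∧
      PySem.Int.floordiv l 5 ≤ PySem.Int.floordiv r 5)) :
    (PySem.List.pyRange (PySem.Int.floordiv l 5 * 5) ((PySem.Int.floordiv r 5 + 1) * 5) 1).filter
        good05
      = (bfsLoop (r.toNat + 1) r 5 [5] [0]).filter (fun x => decide (l ≤ x ∧ x ≤ r)) := by
  obtain ⟨hp, hm⟩ := nums_spec r
  have pw1 : ((PySem.List.pyRange (PySem.Int.floordiv l 5 * 5)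
      ((PySem.Int.floordiv r 5 + 1) * 5) 1).filter good05).Pairwise (· < ·) :=
    (PySem.List.pairwise_lt_pyRange_one _ _).filter _
  have pw2 : ((bfsLoop (r.toNat + 1) r 5 [5] [0]).filter
      (fun x => decide (l ≤ x ∧ x ≤ r))).Pairwise (· < ·) := hp.filter _
  have hmem : ∀ x : Int,
      x ∈ (PySem.List.pyRange (PySem.Int.floordiv l 5 * 5)
          ((PySem.Int.floordiv r 5 + 1) * 5) 1).filter good05 ↔
      x ∈ (bfsLoop (r.toNat + 1) r 5 [5] [0]).filter (fun x => decide (l ≤ x ∧ x ≤ r)) := by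
    intro x
    simp only [List.mem_filter, PySem.List.mem_pyRange_one, decide_eq_true_eq]
    constructor
    · rintro ⟨⟨h1, h2⟩, hg⟩
      have hb := (mem_core l r x hND hg).mp ⟨h1, h2⟩
      exact ⟨(hm x hb.2).mpr hg, hb⟩
    · rintro ⟨hn, h1, h2⟩
      have hg := (hm x h2).mp hn
      exact ⟨(mem_core l r x hND hg).mpr ⟨h1, h2⟩, hg⟩
  exact List.Perm.eq_of_pairwise (fun _ _ _ _ h1 h2 => (lt_asymm h1 h2).elim) pw1 pw2
    ((List.perm_ext_iff_of_nodup (pw1.imp ne_of_lt) (pw2.imp ne_of_lt)).mpr hmem)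

-- dig05 reads the digits that D_solution extracts arithmetically
lemma dig05_iff_all (n : Nat) :
    dig05 n = true ↔ ∀ k : Nat, n / 10 ^ k % 10 = 0 ∨ n / 10 ^ k % 10 = 5 := by
  induction n using Nat.strong_induction_on with
  | _ n ih =>
    rcases Nat.eq_zero_or_pos n with h0 | h0
    · subst h0
      simp [dig05, digits05, Nat.zero_div]
    · rw [dig05_eq, if_neg (by omega), Bool.and_eq_true]
      have ihd := ih (n / 10) (Nat.div_lt_self h0 (by norm_num))
      have hdd : ∀ k : Nat, n / 10 / 10 ^ k = n / 10 ^ (k + 1) := by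
        intro k
        rw [Nat.div_div_eq_div_mul]
        congr 1
        ring
      constructor
      · rintro ⟨h1, h2⟩
        intro k
        match k with
        | 0 =>
          simp only [pow_zero, Nat.div_one]
          simp only [Bool.or_eq_true, beq_iff_eq] at h1
          exact h1
        | k + 1 =>
          rw [← hdd k]
          exact (ihd.mp h2) k
      · intro h
        refine ⟨?_, ihd.mpr fun k => ?_⟩
        · have := h 0
          simp only [pow_zero, Nat.div_one] at this
          simp only [Bool.or_eq_true, beq_iff_eq]
          exact this
        · rw [hdd k]
          exact h (k + 1)

-- under the domain bound, D_solution says exactly: l%5 ≠ 0, (l//5)*5 is a 0/5-digit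
-- number, and A's scanned range is nonempty
lemma D_iff (l r : Int) (hb : l ≤ 2147483648) :
    D_solution l r ↔
      (PySem.Int.mod l 5 ≠ 0 ∧ good05 (PySem.Int.floordiv l 5 * 5) = true ∧
        PySem.Int.floordiv l 5 ≤ PySem.Int.floordiv r 5) := by
  have hl := PySem.Int.floordiv_mul_add_mod l 5
  have hlm1 := PySem.Int.mod_nonneg l (by norm_num : (0:Int) < 5)
  have hlm2 := PySem.Int.mod_lt l (by norm_num : (0:Int) < 5)
  have hfd : 0 ≤ l → PySem.Int.floordiv l 5 = l / 5 := fun _ =>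
    PySem.Int.floordiv_eq_ediv_of_pos (by norm_num)
  have hcast : 0 ≤ l / 5 * 5 → ∀ j : Nat,
      (((l / 5 * 5).toNat / 10 ^ j % 10 : Nat) : Int) = l / 5 * 5 / 10 ^ j % 10 := by
    intro h0 j
    push_cast
    rw [Int.toNat_of_nonneg h0]
  have hpow : ∀ k : Nat, 11 ≤ k → (2147483648 : Nat) < 10 ^ k := by
    intro k hk
    have h1 : (10:Nat) ^ 11 ≤ 10 ^ k := Nat.pow_le_pow_right (by norm_num) hk
    have h2 : (10:Nat) ^ 11 = 100000000000 := by norm_num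
    omega
  unfold D_solution
  constructor
  · rintro ⟨h1, h2, h3, h4⟩
    have hf := hfd h2
    have hlo0 : 0 ≤ l / 5 * 5 := by
      have : (0:Int) ≤ l / 5 := Int.ediv_nonneg h2 (by norm_num)
      omega
    refine ⟨h1, ?_, h3⟩
    rw [hf]
    simp only [good05, Bool.and_eq_true, decide_eq_true_eq]
    refine ⟨hlo0, ?_⟩
    rw [dig05_iff_all]
    intro k
    by_cases hk : k < 11
    · have hc := hcast hlo0 k
      rcases h4 k hk with h | h <;> omega
    · left
      have hsm : (l / 5 * 5).toNat < 10 ^ k := by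
        have := hpow k (by omega)
        omega
      rw [Nat.div_eq_of_lt hsm]
  · rintro ⟨h1, h2, h3⟩
    have hlo0 : (0:Int) ≤ PySem.Int.floordiv l 5 * 5 := good05_nonneg _ h2
    have hl0 : 0 ≤ l := by omega
    have hf := hfd hl0
    refine ⟨h1, hl0, h3, ?_⟩
    rw [hf] at h2 hlo0
    simp only [good05, Bool.and_eq_true, decide_eq_true_eq] at h2
    have hall := (dig05_iff_all _).mp h2.2
    intro k _
    have hc := hcast hlo0 k
    rcases hall k with h | h <;> omega

-- ===== VERDICT (by name: the statement is the Claim_ definition above) =====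
theorem solution_spec : Claim_unchanged_solution := by
  intro l r hDom hND
  have hb : l ≤ 2147483648 := by
    simp only [Dom_solution, pvDomInt, Bool.and_eq_true, decide_eq_true_eq] at hDom
    exact hDom.1.2
  rw [D_iff l r hb] at hND
  show solution l r = solution_alt l r
  simp only [solution, solution_alt]
  rw [A_fold, lists_eq l r hND]
  set L := (bfsLoop (r.toNat + 1) r 5 [5] [0]).filter (fun x => decide (l ≤ x ∧ x ≤ r)) with hL
  rcases eq_or_ne L [] with hE | hE
  · have h1 : PySem.List.len L = 0 := by rw [hE]; rfl
    rw [if_pos h1, if_pos hE]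
  · rw [if_neg hE, if_neg]
    intro hlen
    rw [PySem.List.len_eq] at hlen
    exact hE (List.length_eq_zero_iff.mp (by exact_mod_cast hlen))
theorem solution_changed : Claim_changed_solution := by unfold Claim_changed_solution; decide
theorem solution_tight : Claim_exact_solution := by
  intro l r hDom hD heq
  have hb : l ≤ 2147483648 := by
    simp only [Dom_solution, pvDomInt, Bool.and_eq_true, decide_eq_true_eq] at hDom
    exact hDom.1.2
  obtain ⟨hm0, hg, hk⟩ := (D_iff l r hb).mp hD
  have hl := PySem.Int.floordiv_mul_add_mod l 5
  have hlm1 := PySem.Int.mod_nonneg l (by norm_num : (0:Int) < 5)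
  have hlm2 := PySem.Int.mod_lt l (by norm_num : (0:Int) < 5)
  set lo := PySem.Int.floordiv l 5 * 5 with hlo
  have hlol : lo < l := by omega
  have hA : lo ∈ solution l r := by
    simp only [solution]
    rw [A_fold]
    have hmem : lo ∈ (PySem.List.pyRange lo ((PySem.Int.floordiv r 5 + 1) * 5) 1).filter good05 := by
      rw [List.mem_filter]
      refine ⟨PySem.List.mem_pyRange_one.mpr ⟨le_refl lo, ?_⟩, hg⟩
      have : PySem.Int.floordiv l 5 ≤ PySem.Int.floordiv r 5 := hk
      omega
    rw [if_neg]
    · exact hmem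
    · intro hlen
      rw [PySem.List.len_eq] at hlen
      exact List.ne_nil_of_mem hmem (List.length_eq_zero_iff.mp (by exact_mod_cast hlen))
  rw [heq] at hA
  simp only [solution_alt] at hA
  set L := (bfsLoop (r.toNat + 1) r 5 [5] [0]).filter (fun x => decide (l ≤ x ∧ x ≤ r)) with hLdef
  rcases eq_or_ne L [] with hE | hE
  · rw [if_pos hE] at hA
    have h0 := good05_nonneg lo hg
    simp only [List.mem_singleton] at hA
    omega
  · rw [if_neg hE] at hA
    have := (List.mem_filter.mp hA).2
    simp only [decide_eq_true_eq] at this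
    omega
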